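-- pv_equiv track=rewrite | github.com/Hemanthakumarams/Python-Practice | OOPs/Data Structures/test.py | generate_with_repetition
-- ===== SOURCE A (Python) =====
-- def generate_with_repetition(s, prefix="", length=0, max_length=None, results=None):
--     if results is None:
--         results = []
--
--     if length > 0:
--         results.append(prefix)
--
--     if length == max_length:   # stop when max length reached
--         return results
--
--     for i in range(len(s)):
--         generate_with_repetition(s, prefix + s[i], length + 1, max_length, results)
--
--     return results
-- ===== SOURCE B (Python) =====
-- def generate_with_repetition(s, prefix="", length=0, max_length=None, results=None):
--     if results is None:
--         results = []
--     stack = [(prefix, length)]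
--     while stack:
--         p, l = stack.pop()
--         if l > 0:
--             results.append(p)
--         if l != max_length:
--             for i in range(len(s) - 1, -1, -1):
--                 stack.append((p + s[i], l + 1))
--     return results
-- ===== Notes on version B (the rewrite author's own statement) =====
-- stated objective: alternative
-- what changed: Replaced A's recursive DFS by an iterative traversal with an explicit LIFO stack, pushing children right-to-left so A's preorder output order is preserved.
import Mathlib
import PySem

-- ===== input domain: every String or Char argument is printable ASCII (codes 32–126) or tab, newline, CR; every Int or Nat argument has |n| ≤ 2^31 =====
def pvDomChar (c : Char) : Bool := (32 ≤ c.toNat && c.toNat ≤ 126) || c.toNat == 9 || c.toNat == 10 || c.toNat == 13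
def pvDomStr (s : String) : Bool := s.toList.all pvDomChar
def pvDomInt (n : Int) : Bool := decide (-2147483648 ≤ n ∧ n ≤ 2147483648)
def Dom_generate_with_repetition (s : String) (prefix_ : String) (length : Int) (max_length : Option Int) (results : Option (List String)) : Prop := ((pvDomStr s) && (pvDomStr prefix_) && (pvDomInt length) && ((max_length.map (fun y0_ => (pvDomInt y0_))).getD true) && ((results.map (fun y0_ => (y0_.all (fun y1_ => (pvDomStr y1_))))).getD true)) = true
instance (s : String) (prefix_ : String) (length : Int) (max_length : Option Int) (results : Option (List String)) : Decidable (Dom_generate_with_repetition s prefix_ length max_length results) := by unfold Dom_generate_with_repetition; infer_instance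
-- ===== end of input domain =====

-- B replaces A's recursion by an iterative DFS with an explicit LIFO stack (children pushed
-- right-to-left to keep A's preorder); objective: alternative decomposition, same output order.
-- Both Pythons append into the caller-supplied `results` list identically; the equivalence
-- proved here is about the return value.

-- ===== PORT A =====
-- Python's `length == max_length`: an int never equals None.
def pvEqOptInt (length : Int) (max_length : Option Int) : Bool :=
  match max_length with
  | some m => length == m
  | none => false

-- A's recursion, with a fuel counter making the (possibly non-terminating) Python recursion
-- total; `fuelA` below is large enough on every input admitted by Pre_.
def genRepA (s : List Char) (fuel : Nat) (prefix_ : String) (length : Int)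
    (max_length : Option Int) (results : List String) : List String :=
  match fuel with
  | 0 => results
  | fuel + 1 =>
    let results := if length > 0 then results ++ [prefix_] else results
    if pvEqOptInt length max_length then results
    else s.foldl (fun acc c => genRepA s fuel (prefix_.push c) (length + 1) max_length acc) results

def fuelA (length : Int) (max_length : Option Int) : Nat :=
  match max_length with
  | some m => (m - length).toNat + 1
  | none => 1

def generate_with_repetition (s : String) (prefix_ : String) (length : Int)
    (max_length : Option Int) (results : Option (List String)) : List String :=
  genRepA s.toList (fuelA length max_length) prefix_ length max_length (results.getD [])

-- ===== PORT B =====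
-- B's while-loop over the explicit stack, with a fuel counter bounding the number of
-- iterations; `fuelB` below is large enough on every input admitted by Pre_.
def genRepB (s : List Char) (max_length : Option Int) :
    Nat → List (String × Int) → List String → List String
  | _, [], results => results
  | 0, _, results => results
  | fuel + 1, (p, l) :: stack, results =>
    let results := if l > 0 then results ++ [p] else results
    let stack :=
      if pvEqOptInt l max_length then stack
      else s.reverse.foldl (fun st c => (p.push c, l + 1) :: st) stack
    genRepB s max_length fuel stack results

def fuelB (s : String) (length : Int) (max_length : Option Int) : Nat :=
  match max_length with
  | some m => (s.toList.length + 1) ^ ((m - length).toNat + 1) + 1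
  | none => 2

def generate_with_repetition_alt (s : String) (prefix_ : String) (length : Int)
    (max_length : Option Int) (results : Option (List String)) : List String :=
  genRepB s.toList max_length (fuelB s length max_length) [(prefix_, length)] (results.getD [])

-- ===== PRECONDITION & SPEC =====
-- Pre_ excludes exactly the inputs on which A never returns (RecursionError): a nonempty s
-- together with max_length = None or max_length below the starting length; B spins forever there.
def Pre_generate_with_repetition (s : String) (_prefix_ : String) (length : Int)
    (max_length : Option Int) (_results : Option (List String)) : Prop :=
  s = "" ∨ max_length.any (fun m => decide (length ≤ m)) = true

instance (s : String) (prefix_ : String) (length : Int) (max_length : Option Int) (results : Option (List String)) : Decidable (Pre_generate_with_repetition s prefix_ length max_length results) := by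
  unfold Pre_generate_with_repetition; infer_instance

def pvWitness_generate_with_repetition : String × String × Int × Option Int × Option (List String) :=
  ("ab", "", 0, some 2, none)

def Spec_generate_with_repetition (s : String) (prefix_ : String) (length : Int) (max_length : Option Int) (results : Option (List String)) (out : List String) : Prop := out = generate_with_repetition_alt s prefix_ length max_length results
instance (s : String) (prefix_ : String) (length : Int) (max_length : Option Int) (results : Option (List String)) (out : List String) : Decidable (Spec_generate_with_repetition s prefix_ length max_length results out) := by unfold Spec_generate_with_repetition; infer_instance

-- ===== CLAIM (what is proved, stated in full; the proofs are below) =====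
def Claim_equal_generate_with_repetition : Prop := ∀ (s : String) (prefix_ : String) (length : Int) (max_length : Option Int) (results : Option (List String)), Dom_generate_with_repetition s prefix_ length max_length results → Pre_generate_with_repetition s prefix_ length max_length results → Spec_generate_with_repetition s prefix_ length max_length results (generate_with_repetition s prefix_ length max_length results)

-- ===== LEMMAS AND PROOFS =====

-- The strings emitted (in order) by the terminating tree of depth d rooted at (p, l).
def genTree (s : List Char) : Nat → String → Int → List String
  | 0, p, l => if l > 0 then [p] else []
  | d + 1, p, l => (if l > 0 then [p] else []) ++ s.flatMap (fun c => genTree s d (p.push c) (l + 1))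

-- Number of nodes of that tree.
def genNodes (n : Nat) : Nat → Nat
  | 0 => 1
  | d + 1 => 1 + n * genNodes n d

theorem genNodes_pos (n d : Nat) : 1 ≤ genNodes n d := by
  cases d <;> simp [genNodes]

theorem genNodes_le (n d : Nat) : genNodes n d ≤ (n + 1) ^ (d + 1) := by
  induction d with
  | zero => simp [genNodes]
  | succ d ih =>
    have h1 : 1 ≤ (n + 1) ^ (d + 1) := Nat.one_le_pow _ _ (Nat.succ_pos n)
    calc genNodes n (d + 1) = 1 + n * genNodes n d := rfl
      _ ≤ 1 + n * (n + 1) ^ (d + 1) := by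
          have := Nat.mul_le_mul_left n ih; omega
      _ ≤ (n + 1) ^ (d + 1) + n * (n + 1) ^ (d + 1) := by omega
      _ = (n + 1) ^ (d + 2) := by ring

theorem if_append (c : Prop) [Decidable c] (res : List String) (p : String) :
    (if c then res ++ [p] else res) = res ++ (if c then [p] else []) := by
  split <;> simp

-- A's recursion computes the tree flatten, appended to the accumulated results.
theorem genRepA_eq_tree (s : List Char) (m : Int) (d : Nat) :
    ∀ (fuel : Nat) (p : String) (l : Int) (res : List String),
      (m - l).toNat = d → l ≤ m → d < fuel →
      genRepA s fuel p l (some m) res = res ++ genTree s d p l := by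
  induction d with
  | zero =>
    intro fuel p l res hd hle hf
    cases fuel with
    | zero => omega
    | succ fuel =>
    have hlm : l = m := by omega
    simp [genRepA, pvEqOptInt, hlm, genTree, if_append]
  | succ d ih =>
    intro fuel p l res hd hle hf
    cases fuel with
    | zero => omega
    | succ fuel =>
    have hlt : l < m := by omega
    have hne : (l == m) = false := by simp; omega
    have hfold : ∀ (t : List Char) (res : List String),
        (∀ c ∈ t, c ∈ s) →
        t.foldl (fun acc c => genRepA s fuel (p.push c) (l + 1) (some m) acc) res
          = res ++ t.flatMap (fun c => genTree s d (p.push c) (l + 1)) := by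
      intro t
      induction t with
      | nil => intro res _; simp
      | cons c t iht =>
        intro res hmem
        simp only [List.foldl_cons, List.flatMap_cons]
        rw [ih fuel (p.push c) (l + 1) res (by omega) (by omega) (by omega),
          iht _ (fun x hx => hmem x (List.mem_cons_of_mem _ hx)), List.append_assoc]
    simp only [genRepA, pvEqOptInt, hne, Bool.false_eq_true, if_false, genTree]
    rw [if_append, hfold s _ (fun c hc => hc), List.append_assoc]

-- Pushing children right-to-left onto the stack equals prepending them in order.
theorem reverse_foldl_push {α β : Type} (f : α → β) (t : List α) (st : List β) :
    t.reverse.foldl (fun acc c => f c :: acc) st = t.map f ++ st := by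
  induction t generalizing st with
  | nil => simp
  | cons c t iht => simp [List.foldl_append, iht]

theorem sum_map_const (t : List Char) (k : Nat) : (t.map fun _ => k).sum = t.length * k := by
  induction t with
  | nil => simp
  | cons c t iht => simp [Nat.succ_mul]; omega

def genCost (n : Nat) (m : Int) (stack : List (String × Int)) : Nat :=
  (stack.map (fun e => genNodes n (m - e.2).toNat)).sum

-- B's stack loop computes the concatenation of the trees of all stack entries.
theorem genRepB_eq_tree (s : List Char) (m : Int) :
    ∀ (fuel : Nat) (stack : List (String × Int)) (res : List String),
      (∀ e ∈ stack, e.2 ≤ m) → genCost s.length m stack ≤ fuel →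
      genRepB s (some m) fuel stack res
        = res ++ stack.flatMap (fun e => genTree s (m - e.2).toNat e.1 e.2) := by
  intro fuel
  induction fuel with
  | zero =>
    intro stack res hok hcost
    cases stack with
    | nil => simp [genRepB]
    | cons e stack =>
      exfalso
      have := genNodes_pos s.length (m - e.2).toNat
      simp [genCost] at hcost; omega
  | succ fuel ih =>
    intro stack res hok hcost
    cases stack with
    | nil => simp [genRepB]
    | cons e stack =>
      obtain ⟨p, l⟩ := e
      have hlm : l ≤ m := hok _ (List.mem_cons_self)
      by_cases hlem : l = m
      · have hd0 : (m - l).toNat = 0 := by omega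
        have hbeq : (l == m) = true := by simp [hlem]
        have hstep : genRepB s (some m) (fuel + 1) ((p, l) :: stack) res
            = genRepB s (some m) fuel stack (if l > 0 then res ++ [p] else res) := by
          simp [genRepB, pvEqOptInt, hbeq]
        have hc : genCost s.length m stack ≤ fuel := by
          have h1 := genNodes_pos s.length (m - l).toNat
          simp only [genCost, List.map_cons, List.sum_cons] at hcost
          simp only [genCost]; omega
        rw [hstep, ih stack _ (fun e he => hok e (List.mem_cons_of_mem _ he)) hc]
        simp only [List.flatMap_cons, hd0, genTree]
        rw [if_append]; simp [List.append_assoc]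
      · have hne : (l == m) = false := by simp [hlem]
        have hd : ∃ d, (m - l).toNat = d + 1 := ⟨(m - l).toNat - 1, by omega⟩
        obtain ⟨d, hd⟩ := hd
        simp only [genRepB, pvEqOptInt, hne, Bool.false_eq_true, if_false]
        rw [reverse_foldl_push (fun c => (p.push c, l + 1)) s stack]
        have hok' : ∀ e ∈ s.map (fun c => (p.push c, l + 1)) ++ stack, e.2 ≤ m := by
          intro e he
          rcases List.mem_append.mp he with h | h
          · obtain ⟨c, _, rfl⟩ := List.mem_map.mp h; simp; omega
          · exact hok e (List.mem_cons_of_mem _ h)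
        have hcost' : genCost s.length m (s.map (fun c => (p.push c, l + 1)) ++ stack) ≤ fuel := by
          simp only [genCost, List.map_append, List.sum_append, List.map_map] at hcost ⊢
          have h1 : (s.map ((fun e => genNodes s.length (m - e.2).toNat) ∘ fun c => (p.push c, l + 1))).sum
              = s.length * genNodes s.length d := by
            rw [List.map_congr_left (l := s)
              (f := (fun e => genNodes s.length (m - e.2).toNat) ∘ fun c => (p.push c, l + 1))
              (g := fun _ => genNodes s.length d)
              (by intro c _; simp [Function.comp]; congr 1; omega)]
            exact sum_map_const s _
          rw [h1]
          simp only [List.map_cons, List.sum_cons, hd, genNodes] at hcost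
          omega
        rw [ih _ _ hok' hcost']
        simp only [List.flatMap_append, List.flatMap_cons, hd, genTree, List.flatMap_map]
        have : (s.flatMap fun c => genTree s (m - (l + 1)).toNat (p.push c) (l + 1))
            = s.flatMap fun c => genTree s d (p.push c) (l + 1) := by
          congr 1; funext c; congr 1; omega
        rw [if_append, this]
        simp [List.append_assoc]

-- Both programs on an empty alphabet: one node only.
theorem genRepA_empty (fuel : Nat) (p : String) (l : Int) (mo : Option Int) (res : List String) :
    genRepA [] (fuel + 1) p l mo res = res ++ (if l > 0 then [p] else []) := by
  cases mo with
  | none => simp [genRepA, pvEqOptInt, if_append]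
  | some m =>
    by_cases h : l = m <;> simp [genRepA, pvEqOptInt, h, if_append]

theorem genRepB_empty (fuel : Nat) (p : String) (l : Int) (mo : Option Int) (res : List String) :
    genRepB [] mo (fuel + 1) [(p, l)] res = res ++ (if l > 0 then [p] else []) := by
  have hnil : ∀ f r, genRepB ([] : List Char) mo f ([] : List (String × Int)) r = r := by
    intro f r; cases f <;> rfl
  by_cases h : pvEqOptInt l mo = true <;>
    simp [genRepB, h, List.reverse_nil, List.foldl_nil, hnil, if_append]

-- ===== VERDICT (by name: the statement is the Claim_ definition above) =====
theorem generate_with_repetition_spec : Claim_equal_generate_with_repetition := by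
  intro s prefix_ length max_length results _ hpre
  unfold Spec_generate_with_repetition generate_with_repetition generate_with_repetition_alt
  rcases hpre with hs | hm
  · subst hs
    have hA := genRepA_empty (fuelA length max_length - 1) prefix_ length max_length (results.getD [])
    have hB := genRepB_empty (fuelB "" length max_length - 1) prefix_ length max_length (results.getD [])
    have h1 : fuelA length max_length - 1 + 1 = fuelA length max_length := by
      cases max_length <;> simp [fuelA]
    have h2 : fuelB "" length max_length - 1 + 1 = fuelB "" length max_length := by
      cases max_length <;> simp [fuelB]
    rw [h1] at hA; rw [h2] at hB
    simp only [show ("" : String).toList = [] from rfl] at *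
    rw [hA, hB]
  · cases max_length with
    | none => exact absurd hm (by simp)
    | some m =>
      set d := (m - length).toNat with hd
      have hle : length ≤ m := by simpa using hm
      rw [genRepA_eq_tree s.toList m d (fuelA length (some m)) prefix_ length _ hd.symm hle
        (by simp [fuelA, hd])]
      rw [genRepB_eq_tree s.toList m (fuelB s length (some m)) [(prefix_, length)] _
        (by intro e he; simp only [List.mem_singleton] at he; subst he; simpa using hle)
        (by
          simp only [genCost, List.map_cons, List.map_nil, List.sum_cons, List.sum_nil, Nat.add_zero]
          calc genNodes s.toList.length (m - length).toNat
              ≤ (s.toList.length + 1) ^ ((m - length).toNat + 1) := genNodes_le _ _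
            _ ≤ fuelB s length (some m) := by simp [fuelB])]
      simp [hd]
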